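-- pv_equiv track=rewrite | github.com/cdccnleo/RQA2025 | tests/unit/infrastructure/security/test_security_compliance.py | _validate_input_safety
-- ===== SOURCE A (Python) =====
-- def _validate_input_safety(input_str: str) -> bool:
--     """验证输入安全性"""
--     dangerous_patterns = [
--         "';", "DROP", "SELECT", "INSERT", "UPDATE", "DELETE",
--         "<script>", "javascript:", "data:", "../../../../"
--     ]
--
--     # 检查危险模式
--     for pattern in dangerous_patterns:
--         if pattern.lower() in input_str.lower():
--             return False
--
--     # 检查危险字符
--     dangerous_chars = ["'", "<", ">", "\"", ";", "--", "/*", "*/"]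
--     for char in dangerous_chars:
--         if char in input_str:
--             return False
--
--     return True
-- ===== SOURCE B (Python) =====
-- # One left-to-right scan: at each position, test whether any dangerous token
-- # starts there (on the lowercased string; the pure-punctuation tokens are
-- # unchanged by lowercasing, so this matches the original's case-sensitive
-- # character checks too).
-- _DANGEROUS = [
--     "';", "drop", "select", "insert", "update", "delete",
--     "<script>", "javascript:", "data:", "../../../../",
--     "'", "<", ">", "\"", ";", "--", "/*", "*/",
-- ]
--
--
-- def _validate_input_safety(input_str: str) -> bool:
--     low = input_str.lower()
--     return not any(low.startswith(p, i)
--                    for i in range(len(low))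
--                    for p in _DANGEROUS)
-- ===== Notes on version B (the rewrite author's own statement) =====
-- stated objective: alternative
-- what changed: Replaces the ~18 separate substring membership tests with a single position-by-position scan of the lowercased string that checks at each index whether any dangerous token starts there (startswith with a start offset); it trades the C-level substring search for one explicit scan.
import Mathlib
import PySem

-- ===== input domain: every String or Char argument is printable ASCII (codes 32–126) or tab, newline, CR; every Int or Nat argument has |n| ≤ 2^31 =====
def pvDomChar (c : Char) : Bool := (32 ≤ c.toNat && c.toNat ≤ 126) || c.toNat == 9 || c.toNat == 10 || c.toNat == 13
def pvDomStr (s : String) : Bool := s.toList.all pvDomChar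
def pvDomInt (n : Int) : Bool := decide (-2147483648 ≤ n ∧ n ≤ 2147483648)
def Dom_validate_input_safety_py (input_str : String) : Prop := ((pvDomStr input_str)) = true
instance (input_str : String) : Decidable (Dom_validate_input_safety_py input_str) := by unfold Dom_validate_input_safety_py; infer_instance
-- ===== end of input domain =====

-- B replaces the ~18 separate substring membership tests with one left-to-right scan of the
-- lowercased string, testing at each index whether any dangerous token starts there.

-- ===== PORT A =====
-- literal transliteration of _validate_input_safety: two for-loops with early return = two List.any tests in order
def validate_input_safety_py (input_str : String) : Bool :=
  let dangerous_patterns : List String :=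
    ["';", "DROP", "SELECT", "INSERT", "UPDATE", "DELETE",
     "<script>", "javascript:", "data:", "../../../../"]
  if dangerous_patterns.any (fun pattern =>
      PySem.Str.isIn (PySem.Str.lower pattern) (PySem.Str.lower input_str)) then false
  else
    let dangerous_chars : List String := ["'", "<", ">", "\"", ";", "--", "/*", "*/"]
    if dangerous_chars.any (fun ch => PySem.Str.isIn ch input_str) then false
    else true

-- ===== PORT B =====
def pvDangerous : List String :=
  ["';", "drop", "select", "insert", "update", "delete",
   "<script>", "javascript:", "data:", "../../../../",
   "'", "<", ">", "\"", ";", "--", "/*", "*/"]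

-- port of Source B: `low.startswith(p, i)` with 0 ≤ i is exactly `p` being a prefix of the i-th
-- suffix of `low`, i.e. PySem.Chars.startswith (low.toList.drop i.toNat) p.toList
def validate_input_safety_py_alt (input_str : String) : Bool :=
  let low := PySem.Str.lower input_str
  !((PySem.List.pyRange 0 (PySem.Str.len low) 1).any (fun i =>
      pvDangerous.any (fun p => PySem.Chars.startswith (low.toList.drop i.toNat) p.toList)))

-- ===== PRECONDITION & SPEC =====
def Spec_validate_input_safety_py (input_str : String) (out : Bool) : Prop := out = validate_input_safety_py_alt input_str
instance (input_str : String) (out : Bool) : Decidable (Spec_validate_input_safety_py input_str out) := by unfold Spec_validate_input_safety_py; infer_instance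

-- ===== CLAIM (what is proved, stated in full; the proofs are below) =====
def Claim_equal_validate_input_safety_py : Prop := ∀ (input_str : String), Dom_validate_input_safety_py input_str → Spec_validate_input_safety_py input_str (validate_input_safety_py input_str)

-- ===== LEMMAS AND PROOFS =====
set_option maxRecDepth 10000

lemma char_le_iff (a b : Char) : a ≤ b ↔ a.toNat ≤ b.toNat := by
  rw [Char.le_def, Char.toNat, Char.toNat, UInt32.le_iff_toNat_le]

-- a character that is not a lowercase letter is hit by lowerChar only from itself
lemma lowerChar_eq_of_nonletter (y : Char) (hy : ¬ ('a' ≤ y ∧ y ≤ 'z')) (x : Char)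
    (hx : PySem.Chars.lowerChar x = y) : x = y := by
  unfold PySem.Chars.lowerChar PySem.Chars.isupper at hx
  split at hx
  · exfalso
    rename_i h
    simp only [Bool.and_eq_true, decide_eq_true_eq, char_le_iff] at h
    have h1 : 65 ≤ x.toNat := h.1
    have h2 : x.toNat ≤ 90 := h.2
    have hv : (x.toNat + 32).isValidChar := Or.inl (by omega)
    have hyn : y.toNat = x.toNat + 32 := by
      rw [← hx, Char.toNat_ofNat, if_pos hv]
    exact hy ⟨(char_le_iff _ _).2 (by simp [hyn]; omega),
              (char_le_iff _ _).2 (by simp [hyn]; omega)⟩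
  · exact hx

lemma map_eq_self_of_inj_hits (f : Char → Char) (p : List Char)
    (h : ∀ c ∈ p, ∀ x, f x = c → x = c) :
    ∀ q, q.map f = p → q = p := by
  induction p with
  | nil => intro q hq; simpa using hq
  | cons a t ih =>
    intro q hq
    cases q with
    | nil => simp at hq
    | cons b u =>
      simp only [List.map_cons, List.cons.injEq] at hq
      have hb : b = a := h a (by simp) b hq.1
      have hu : u = t := ih (fun c hc => h c (by simp [hc])) u hq.2
      rw [hb, hu]

-- for a pattern of non-letter characters, occurrence in lower s = occurrence in s
lemma lower_infix_iff (p s : List Char)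
    (hfix : ∀ c ∈ p, PySem.Chars.lowerChar c = c)
    (hnl : ∀ c ∈ p, ¬ ('a' ≤ c ∧ c ≤ 'z')) :
    p <:+: PySem.Chars.lower s ↔ p <:+: s := by
  unfold PySem.Chars.lower
  constructor
  · rintro ⟨t1, t2, h⟩
    have h' : s.map PySem.Chars.lowerChar = t1 ++ (p ++ t2) := by
      rw [← h]; simp
    rw [List.map_eq_append_iff] at h'
    obtain ⟨u1, u2, rfl, hm1, hm2⟩ := h'
    rw [List.map_eq_append_iff] at hm2
    obtain ⟨q, u3, rfl, hmq, hm3⟩ := hm2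
    have hq : q = p :=
      map_eq_self_of_inj_hits _ p (fun c hc x => lowerChar_eq_of_nonletter c (hnl c hc) x) q hmq
    exact ⟨u1, u3, by rw [hq]; simp⟩
  · rintro ⟨t1, t2, rfl⟩
    refine ⟨t1.map PySem.Chars.lowerChar, t2.map PySem.Chars.lowerChar, ?_⟩
    have hp : p.map PySem.Chars.lowerChar = p := by
      calc p.map PySem.Chars.lowerChar = p.map id := List.map_congr_left hfix
        _ = p := List.map_id p
    simp [hp]

-- one scan over all start positions finds a nonempty pattern iff it is a substring
lemma scan_iff (p low : List Char) (hp : p ≠ []) :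
    (∃ i ∈ PySem.List.pyRange 0 (low.length : Int) 1,
        PySem.Chars.startswith (low.drop i.toNat) p = true) ↔
      PySem.Chars.isIn p low = true := by
  constructor
  · rintro ⟨i, _, hsw⟩
    exact (PySem.Chars.exists_prefix_drop_iff_isIn p low).1
      ⟨i.toNat, (PySem.Chars.startswith_iff _ _).1 hsw⟩
  · intro h
    obtain ⟨j, hj⟩ := (PySem.Chars.exists_prefix_drop_iff_isIn p low).2 h
    have hlt : j < low.length := by
      by_contra hge
      have : low.drop j = [] := List.drop_eq_nil_of_le (by omega)
      rw [this, List.prefix_nil] at hj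
      exact hp hj
    refine ⟨(j : Int), ?_, ?_⟩
    · rw [PySem.List.mem_pyRange_one]
      constructor <;> [positivity; exact_mod_cast hlt]
    · rw [Int.toNat_natCast]
      exact (PySem.Chars.startswith_iff _ _).2 hj

lemma B_iff (s : String) :
    validate_input_safety_py_alt s = true ↔
      ∀ p ∈ pvDangerous, ¬ p.toList <:+: PySem.Chars.lower s.toList := by
  have hne : ∀ p ∈ pvDangerous, p.toList ≠ [] := by
    intro p hp; fin_cases hp <;> simp
  unfold validate_input_safety_py_alt
  rw [Bool.not_eq_eq_eq_not, Bool.not_true, List.any_eq_false]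
  constructor
  · intro h p hp hinf
    have hIn : PySem.Chars.isIn p.toList (PySem.Chars.lower s.toList) = true := by
      rw [PySem.Chars.isIn_iff_infix]; exact hinf
    have hlen : ((PySem.Str.lower s).toList.length : Int) = PySem.Str.len (PySem.Str.lower s) := by
      simp [PySem.Str.len_eq]
    rw [PySem.Str.toList_lower] at hlen
    obtain ⟨i, hi, hsw⟩ := (scan_iff p.toList (PySem.Chars.lower s.toList) (hne p hp)).2 hIn
    rw [hlen] at hi
    have h2 := h i hi
    rw [Bool.not_eq_true, List.any_eq_false] at h2
    exact h2 p hp (by rw [PySem.Str.toList_lower]; exact hsw)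
  · intro h i hi
    rw [Bool.not_eq_true, List.any_eq_false]
    intro p hp hsw
    rw [PySem.Str.toList_lower] at hsw
    have hlen : ((PySem.Str.lower s).toList.length : Int) = PySem.Str.len (PySem.Str.lower s) := by
      simp [PySem.Str.len_eq]
    rw [PySem.Str.toList_lower] at hlen
    have hIn : PySem.Chars.isIn p.toList (PySem.Chars.lower s.toList) = true :=
      (scan_iff p.toList _ (hne p hp)).1 ⟨i, by rw [← hlen] at hi; exact hi, hsw⟩
    exact h p hp ((PySem.Chars.isIn_iff_infix _ _).1 hIn)

lemma A_iff (s : String) :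
    validate_input_safety_py s = true ↔
      ∀ p ∈ pvDangerous, ¬ p.toList <:+: PySem.Chars.lower s.toList := by
  have hfix : ∀ c ∈ (["'", "<", ">", "\"", ";", "--", "/*", "*/"] : List String),
      ∀ ch ∈ c.toList, PySem.Chars.lowerChar ch = ch := by
    intro c hc
    fin_cases hc <;> (intro ch hch; fin_cases hch <;> rfl)
  have hnl : ∀ c ∈ (["'", "<", ">", "\"", ";", "--", "/*", "*/"] : List String),
      ∀ ch ∈ c.toList, ¬ ('a' ≤ ch ∧ ch ≤ 'z') := by
    intro c hc
    fin_cases hc <;> (intro ch hch; fin_cases hch <;> decide)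
  unfold validate_input_safety_py
  simp only []
  rw [show ∀ (a b : Bool), (if a then false else if b then false else true) = !(a || b) from by decide]
  rw [Bool.not_eq_eq_eq_not, Bool.not_true, Bool.or_eq_false_iff, List.any_eq_false, List.any_eq_false]
  have hA1 : (∀ p ∈ (["';", "DROP", "SELECT", "INSERT", "UPDATE", "DELETE",
        "<script>", "javascript:", "data:", "../../../../"] : List String),
        ¬ PySem.Str.isIn (PySem.Str.lower p) (PySem.Str.lower s) = true) ↔
      (∀ q ∈ pvDangerous.take 10, ¬ q.toList <:+: PySem.Chars.lower s.toList) := by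
    rw [show pvDangerous.take 10 = (["';", "DROP", "SELECT", "INSERT", "UPDATE", "DELETE",
        "<script>", "javascript:", "data:", "../../../../"] : List String).map PySem.Str.lower from rfl]
    rw [List.forall_mem_map]
    exact forall₂_congr fun p hp =>
      not_congr (by rw [PySem.Str.isIn_iff_infix, PySem.Str.toList_lower s])
  have hA2 : (∀ c ∈ (["'", "<", ">", "\"", ";", "--", "/*", "*/"] : List String),
        ¬ PySem.Str.isIn c s = true) ↔
      (∀ c ∈ pvDangerous.drop 10, ¬ c.toList <:+: PySem.Chars.lower s.toList) := by
    rw [show pvDangerous.drop 10 = (["'", "<", ">", "\"", ";", "--", "/*", "*/"] : List String) from rfl]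
    refine forall₂_congr fun c hc => not_congr ?_
    rw [PySem.Str.isIn_iff_infix]
    exact (lower_infix_iff c.toList s.toList (hfix c hc) (hnl c hc)).symm
  rw [hA1, hA2, ← List.forall_mem_append, List.take_append_drop]

-- ===== VERDICT (by name: the statement is the Claim_ definition above) =====
theorem validate_input_safety_py_spec : Claim_equal_validate_input_safety_py := by
  intro s _
  unfold Spec_validate_input_safety_py
  rw [← Bool.coe_iff_coe, A_iff, B_iff]
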